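-- pv_equiv track=rewrite | github.com/Flu-iid/py-algo | algo-training/codecup-2022/کدکاپ ۷ - الگوریتم - نهایی حذف نابه_جایی.py | mechanism
-- ===== SOURCE A (Python) =====
-- def mechanism(list):
--     if len(list) == 0:
--         return True
--     for i in range(len(list)-1):
--         if list[i] > list[i+1]:
--             del list[i:i+2]
--             return mechanism(list)
--     return False
-- ===== SOURCE B (Python) =====
-- def mechanism(list):
--     stack = []
--     for c in list:
--         if stack and stack[-1] > c:
--             stack.pop()
--         else:
--             stack.append(c)
--     return not stack
-- ===== Notes on version B (the rewrite author's own statement) =====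
-- stated objective: faster
-- what changed: Replaced the restart-from-scratch recursion (rescan from index 0 and recurse after every pair deletion) with a single left-to-right stack pass that pops when the top exceeds the current element and reports whether the stack ends empty.
import Mathlib
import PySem

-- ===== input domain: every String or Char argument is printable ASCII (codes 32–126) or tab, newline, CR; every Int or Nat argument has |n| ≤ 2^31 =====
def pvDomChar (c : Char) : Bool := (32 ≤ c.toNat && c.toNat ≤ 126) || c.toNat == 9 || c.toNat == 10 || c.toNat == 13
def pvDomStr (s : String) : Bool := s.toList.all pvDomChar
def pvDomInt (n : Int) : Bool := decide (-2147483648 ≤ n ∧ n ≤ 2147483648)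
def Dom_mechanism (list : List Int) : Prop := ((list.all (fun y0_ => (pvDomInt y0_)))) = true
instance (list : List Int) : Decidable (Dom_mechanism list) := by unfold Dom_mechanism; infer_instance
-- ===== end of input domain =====

-- B replaces A's quadratic rescan-and-recurse with one linear stack pass (objective: faster).
-- Note: Python A mutates its argument in place (del list[i:i+2]); B does not — the claim is about the return value.

-- ===== PORT A =====
-- A's for-loop 'for i in range(len-1): if list[i] > list[i+1]: …' -- returns the first index i
-- with an adjacent inversion (scanning left to right), ported as structural recursion over pairs.
def firstInv : List Int → Option Nat
  | a :: b :: t => if a > b then some 0 else (firstInv (b :: t)).map (· + 1)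
  | _ => none

-- the found index points at an adjacent pair, so i+1 < length (used for termination of the port)
theorem firstInv_lt (l : List Int) (i : Nat) (h : firstInv l = some i) : i + 1 < l.length := by
  induction l generalizing i with
  | nil => simp [firstInv] at h
  | cons a t ih =>
    cases t with
    | nil => simp [firstInv] at h
    | cons b t' =>
      by_cases hab : a > b
      · simp [firstInv, hab] at h
        subst h; simp
      · simp [firstInv, hab] at h
        obtain ⟨j, hj, hji⟩ := h
        have := ih j hj
        simp at this ⊢
        omega

-- port of A: 'del list[i:i+2]' on the found index (0 ≤ i) is take i ++ drop (i+2), then recurse.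
def mechanism (list : List Int) : Bool :=
  if list.length = 0 then true
  else
    match h : firstInv list with
    | some i => mechanism (list.take i ++ list.drop (i + 2))
    | none => false
termination_by list.length
decreasing_by
  have := firstInv_lt list i h
  simp [List.length_take, List.length_drop]
  omega

-- ===== PORT B =====
-- Source B's loop body; the Python stack's top (stack[-1]) is kept at the head of the list.
def step (st : List Int) (c : Int) : List Int :=
  match st with
  | t :: r => if t > c then r else c :: t :: r
  | [] => [c]

-- port of B: one fold over the input, then 'not stack'
def mechanism_alt (list : List Int) : Bool := (list.foldl step []).isEmpty

-- ===== PRECONDITION & SPEC =====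
def Spec_mechanism (list : List Int) (out : Bool) : Prop := out = mechanism_alt list
instance (list : List Int) (out : Bool) : Decidable (Spec_mechanism list out) := by unfold Spec_mechanism; infer_instance

-- ===== CLAIM (what is proved, stated in full; the proofs are below) =====
def Claim_equal_mechanism : Prop := ∀ (list : List Int), Dom_mechanism list → Spec_mechanism list (mechanism list)

-- ===== LEMMAS AND PROOFS =====

-- no inversion found ⇒ the list is nondecreasing
theorem firstInv_none (l : List Int) (h : firstInv l = none) :
    List.IsChain (· ≤ ·) l := by
  induction l with
  | nil => simp
  | cons a t ih =>
    cases t with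
    | nil => simp
    | cons b t' =>
      by_cases hab : a > b
      · simp [firstInv, hab] at h
      · simp [firstInv, hab] at h
        exact List.isChain_cons.mpr ⟨by intro y hy; simp at hy; omega, ih h⟩

-- the first inversion decomposes the list: sorted prefix p ++ [x], then x > y, then the rest
theorem firstInv_some (l : List Int) (i : Nat) (h : firstInv l = some i) :
    ∃ p x y s, l = p ++ x :: y :: s ∧ p.length = i ∧
      List.IsChain (· ≤ ·) (p ++ [x]) ∧ x > y := by
  induction l generalizing i with
  | nil => simp [firstInv] at h
  | cons a t ih =>
    cases t with
    | nil => simp [firstInv] at h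
    | cons b t' =>
      by_cases hab : a > b
      · simp [firstInv, hab] at h
        exact ⟨[], a, b, t', by simp, by simp [← h], List.isChain_singleton a, hab⟩
      · simp [firstInv, hab] at h
        obtain ⟨j, hj, hji⟩ := h
        obtain ⟨p, x, y, s, hl, hlen, hch, hxy⟩ := ih j hj
        refine ⟨a :: p, x, y, s, by simp [hl], by simp [hlen]; omega, ?_, hxy⟩
        refine List.isChain_cons.mpr ⟨?_, hch⟩
        intro h hh
        have hh' : (p ++ [x]).head? = some h := by simpa using hh
        cases p with
        | nil =>
          simp at hl hh'
          omega
        | cons q qs =>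
          have hqb : b = q := by simpa using congrArg List.head? hl
          simp at hh'
          omega

-- running the stack over a nondecreasing list just reverses it onto the stack
theorem foldl_step_sorted (q : List Int) : ∀ st : List Int,
    List.IsChain (· ≤ ·) q → (∀ h ∈ q.head?, ∀ t ∈ st.head?, t ≤ h) →
    List.foldl step st q = q.reverse ++ st := by
  induction q with
  | nil => intro st _ _; simp
  | cons c q' ih =>
    intro st hch hhd
    have hstep : step st c = c :: st := by
      cases st with
      | nil => simp [step]
      | cons t r =>
        have : t ≤ c := hhd c (by simp) t (by simp)
        simp [step]; omega
    have hch' := List.isChain_cons.mp hch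
    rw [List.foldl_cons, hstep, ih (c :: st) hch'.2 ?_]
    · simp
    · intro h hh t ht
      simp at ht
      subst ht
      exact hch'.1 h hh

-- deleting the first inversion pair does not change the final stack
theorem reduce_delete (p : List Int) (x y : Int) (s : List Int)
    (hch : List.IsChain (· ≤ ·) (p ++ [x])) (hxy : x > y) :
    List.foldl step [] (p ++ x :: y :: s) = List.foldl step [] (p ++ s) := by
  have hp : List.IsChain (· ≤ ·) p := (List.isChain_append.mp hch).1
  have h1 : List.foldl step [] (p ++ [x]) = x :: p.reverse := by
    have := foldl_step_sorted (p ++ [x]) [] hch (by simp)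
    simpa using this
  have h2 : List.foldl step [] p = p.reverse := by
    have := foldl_step_sorted p [] hp (by simp)
    simpa using this
  calc List.foldl step [] (p ++ x :: y :: s)
      = List.foldl step (List.foldl step [] (p ++ [x])) (y :: s) := by
        rw [← List.foldl_append]; congr 1; simp
    _ = List.foldl step (step (x :: p.reverse) y) s := by rw [h1]; simp
    _ = List.foldl step p.reverse s := by simp [step, hxy]
    _ = List.foldl step [] (p ++ s) := by rw [List.foldl_append, h2]

theorem mechanism_eq_reduce : ∀ (n : Nat) (l : List Int), l.length ≤ n →
    mechanism l = (List.foldl step [] l).isEmpty := by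
  intro n
  induction n with
  | zero =>
    intro l hl
    have : l = [] := by cases l <;> simp_all
    subst this
    simp [mechanism]
  | succ n ih =>
    intro l hl
    rw [mechanism]
    by_cases hnil : l.length = 0
    · have : l = [] := by cases l <;> simp_all
      subst this; simp
    · simp only [hnil, if_false]
      split
      next i h =>
        obtain ⟨p, x, y, s, hdec, hlen, hch, hxy⟩ := firstInv_some l i h
        have htake : l.take i ++ l.drop (i + 2) = p ++ s := by
          subst hdec hlen
          congr 1
          · rw [List.take_append_of_le_length (by simp)]
            simp
          · have : p ++ x :: y :: s = (p ++ [x, y]) ++ s := by simp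
            rw [this, show p.length + 2 = (p ++ [x, y]).length by simp,
              List.drop_left]
        rw [htake]
        have hlt : (p ++ s).length ≤ n := by
          have : l.length = p.length + 2 + s.length := by simp [hdec]; omega
          simp
          omega
        rw [ih (p ++ s) hlt, hdec, reduce_delete p x y s hch hxy]
      next h =>
        have hch := firstInv_none l h
        have := foldl_step_sorted l [] hch (by simp)
        rw [this]
        cases l with
        | nil => simp at hnil
        | cons a t => simp

-- ===== VERDICT (by name: the statement is the Claim_ definition above) =====
theorem mechanism_spec : Claim_equal_mechanism := by
  intro l _
  unfold Spec_mechanism mechanism_alt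
  exact mechanism_eq_reduce l.length l le_rfl
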